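-- pv_equiv track=rewrite | github.com/lreyes-ml/AbotBahay_HomeMatch | app.py | missing_documents
-- ===== SOURCE A (Python) =====
-- from typing import Dict, List, Optional, Tuple
--
-- REQUIRED_DOCS = [
--     "Government-issued ID",
--     "PSA Birth Certificate",
--     "Marriage/Death Certificate (if applicable)",
--     "Income document (ITR / Pay Slips x3 / Business Permit)",
--     "Pag-IBIG contribution printout (within 3 months)",
--     "Barangay certificate of residency",
--     "Proof of billing address",
-- ]
--
-- def normalize_docs(profile: Dict) -> List[str]:
--     return [d.lower() for d in profile.get("submitted_docs", [])]
--
-- def missing_documents(profile: Dict) -> List[str]: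
--     docs = " | ".join(normalize_docs(profile))
--     required_with_matchers = [
--         (REQUIRED_DOCS[0], ["id", "passport"]),
--         (REQUIRED_DOCS[1], ["psa", "birth certificate"]),
--         (REQUIRED_DOCS[2], ["marriage", "death", "cenomar"]),
--         (REQUIRED_DOCS[3], ["itr", "pay slip", "business permit", "employment contract"]),
--         (REQUIRED_DOCS[4], ["pag-ibig", "hdmf"]),
--         (REQUIRED_DOCS[5], ["barangay"]),
--         (REQUIRED_DOCS[6], ["billing", "utility"]),
--     ]
--     return [label for label, matcher in required_with_matchers if not any(tok in docs for tok in matcher)]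
-- ===== SOURCE B (Python) =====
-- REQUIRED_DOCS = [
--     "Government-issued ID",
--     "PSA Birth Certificate",
--     "Marriage/Death Certificate (if applicable)",
--     "Income document (ITR / Pay Slips x3 / Business Permit)",
--     "Pag-IBIG contribution printout (within 3 months)",
--     "Barangay certificate of residency",
--     "Proof of billing address",
-- ]
--
-- MATCHERS = [
--     (REQUIRED_DOCS[0], ["id", "passport"]),
--     (REQUIRED_DOCS[1], ["psa", "birth certificate"]),
--     (REQUIRED_DOCS[2], ["marriage", "death", "cenomar"]),
--     (REQUIRED_DOCS[3], ["itr", "pay slip", "business permit", "employment contract"]),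
--     (REQUIRED_DOCS[4], ["pag-ibig", "hdmf"]),
--     (REQUIRED_DOCS[5], ["barangay"]),
--     (REQUIRED_DOCS[6], ["billing", "utility"]),
-- ]
--
-- def missing_documents(profile):
--     satisfied = set()
--     for doc in profile.get("submitted_docs", []):
--         d = doc.lower()
--         for label, matcher in MATCHERS:
--             if label not in satisfied and any(tok in d for tok in matcher):
--                 satisfied.add(label)
--     return [label for label in REQUIRED_DOCS if label not in satisfied]
-- ===== Notes on version B (the rewrite author's own statement) =====
-- stated objective: alternative
-- what changed: Instead of concatenating all lowered docs into one ' | '-joined string and substring-searching it once per requirement, B scans each submitted doc once, accumulating a set of satisfied requirement labels, and finally lists the requirements whose label was never satisfied; the loop nesting is transposed and no joined string exists.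
import Mathlib
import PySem

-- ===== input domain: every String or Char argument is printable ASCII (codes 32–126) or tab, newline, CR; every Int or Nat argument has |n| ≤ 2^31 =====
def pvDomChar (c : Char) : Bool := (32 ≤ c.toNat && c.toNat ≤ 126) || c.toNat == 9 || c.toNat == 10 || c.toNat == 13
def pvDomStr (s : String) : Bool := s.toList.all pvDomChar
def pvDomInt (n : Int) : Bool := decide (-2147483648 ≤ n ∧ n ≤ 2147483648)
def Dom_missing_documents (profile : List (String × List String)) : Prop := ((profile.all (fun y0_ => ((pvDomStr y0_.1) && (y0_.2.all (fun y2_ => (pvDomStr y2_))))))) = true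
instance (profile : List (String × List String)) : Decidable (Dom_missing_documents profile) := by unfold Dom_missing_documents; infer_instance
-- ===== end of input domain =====

-- B replaces A's join-then-substring-search-per-requirement with a transposed per-doc scan
-- accumulating a set of satisfied labels (alternative decomposition, same asymptotic cost).

-- ===== PORT A =====
-- shared constant table (Python: REQUIRED_DOCS / required_with_matchers, written with the indexed labels inlined)
def requiredWithMatchers : List (String × List String) :=
  [ ("Government-issued ID", ["id", "passport"]),
    ("PSA Birth Certificate", ["psa", "birth certificate"]),
    ("Marriage/Death Certificate (if applicable)", ["marriage", "death", "cenomar"]),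
    ("Income document (ITR / Pay Slips x3 / Business Permit)", ["itr", "pay slip", "business permit", "employment contract"]),
    ("Pag-IBIG contribution printout (within 3 months)", ["pag-ibig", "hdmf"]),
    ("Barangay certificate of residency", ["barangay"]),
    ("Proof of billing address", ["billing", "utility"]) ]

def normalize_docs (profile : List (String × List String)) : List String :=
  ((PySem.Dict.mk profile).getD "submitted_docs" []).map PySem.Str.lower

def missing_documents (profile : List (String × List String)) : List String :=
  let docs := PySem.Str.join " | " (normalize_docs profile)
  (requiredWithMatchers.filter
      (fun lm => !(lm.2.any (fun tok => PySem.Str.isIn tok docs)))).map (·.1)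

-- ===== PORT B =====
def requiredDocsList : List String := requiredWithMatchers.map (·.1)

def missing_documents_alt (profile : List (String × List String)) : List String :=
  let satisfied : PySem.Set String :=
    ((PySem.Dict.mk profile).getD "submitted_docs" []).foldl
      (fun s doc =>
        let d := PySem.Str.lower doc
        requiredWithMatchers.foldl
          (fun s' lm =>
            if !(PySem.Set.contains s' lm.1) && lm.2.any (fun tok => PySem.Str.isIn tok d)
            then PySem.Set.add s' lm.1 else s') s)
      PySem.Set.empty
  requiredDocsList.filter (fun l => !(PySem.Set.contains satisfied l))

-- ===== PRECONDITION & SPEC =====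
def Spec_missing_documents (profile : List (String × List String)) (out : List String) : Prop := out = missing_documents_alt profile
instance (profile : List (String × List String)) (out : List String) : Decidable (Spec_missing_documents profile out) := by unfold Spec_missing_documents; infer_instance

-- ===== CLAIM (what is proved, stated in full; the proofs are below) =====
def Claim_equal_missing_documents : Prop := ∀ (profile : List (String × List String)), Dom_missing_documents profile → Spec_missing_documents profile (missing_documents profile)

-- ===== LEMMAS AND PROOFS =====

-- A token is "separator-safe" if it is nonempty, contains no '|', and neither starts nor ends with ' '.
abbrev sepSafe (t : List Char) : Prop :=
  t ≠ [] ∧ '|' ∉ t ∧ t.head? ≠ some ' ' ∧ t.getLast? ≠ some ' '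

lemma not_prefix_sep (t b : List Char) (hmem : '|' ∉ t) (hlast : t.getLast? ≠ some ' ') (hne : t ≠ []) :
    ¬ t <+: (' ' :: '|' :: ' ' :: b) := by
  intro h
  match t, h with
  | c :: t', h =>
    rw [List.cons_prefix_cons] at h
    obtain ⟨rfl, h2⟩ := h
    match t', h2 with
    | [], _ => simp at hlast
    | d :: t'', h2 =>
      rw [List.cons_prefix_cons] at h2
      exact hmem (by simp [h2.1])

lemma prefix_append_sep (t a b : List Char) (hmem : '|' ∉ t) (hlast : t.getLast? ≠ some ' ') :
    t <+: (a ++ (' ' :: '|' :: ' ' :: b)) ↔ t <+: a := by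
  induction t generalizing a with
  | nil => simp
  | cons c t' ih =>
    cases a with
    | nil =>
      simp only [List.nil_append]
      constructor
      · intro h; exact absurd h (not_prefix_sep _ b hmem hlast (by simp))
      · intro h; simp at h
    | cons x a' =>
      rw [List.cons_append, List.cons_prefix_cons, List.cons_prefix_cons]
      refine and_congr_right fun _ => ?_
      cases t' with
      | nil => simp
      | cons d t'' =>
        exact ih _ (fun hm => hmem (List.mem_cons_of_mem _ hm))
          (by rwa [List.getLast?_cons_cons] at hlast)

lemma infix_append_sep (t a b : List Char) (h : sepSafe t) :
    t <:+: (a ++ (' ' :: '|' :: ' ' :: b)) ↔ (t <:+: a ∨ t <:+: b) := by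
  obtain ⟨hne, hmem, hhead, hlast⟩ := h
  induction a with
  | nil =>
    simp only [List.nil_append]
    rw [List.infix_cons_iff, List.infix_cons_iff, List.infix_cons_iff]
    constructor
    · rintro (h | h | h | h)
      · exact absurd h (not_prefix_sep _ _ hmem hlast hne)
      · exfalso
        match t, h with
        | c :: t', h => rw [List.cons_prefix_cons] at h; exact hmem (by simp [h.1])
      · exfalso
        match t, h with
        | c :: t', h =>
          rw [List.cons_prefix_cons] at h
          exact hhead (by simp [h.1])
      · exact Or.inr h
    · rintro (h | h)
      · rw [List.infix_nil] at h; exact absurd h hne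
      · exact Or.inr (Or.inr (Or.inr h))
  | cons x a' ih =>
    rw [List.cons_append, List.infix_cons_iff, List.infix_cons_iff]
    rw [ih, ← List.cons_append, prefix_append_sep t (x :: a') b hmem hlast]
    tauto

lemma infix_join_sep (t : List Char) (parts : List (List Char)) (h : sepSafe t) :
    t <:+: PySem.Chars.join [' ', '|', ' '] parts ↔ ∃ p ∈ parts, t <:+: p := by
  induction parts with
  | nil =>
    rw [PySem.Chars.join_nil, List.infix_nil]
    simp [h.1]
  | cons p rest ih =>
    cases rest with
    | nil => simp [PySem.Chars.join_singleton]
    | cons q rest' =>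
      rw [PySem.Chars.join_cons_cons]
      have := infix_append_sep t p (PySem.Chars.join [' ', '|', ' '] (q :: rest')) h
      simp only [List.append_assoc, List.cons_append, List.nil_append] at this ⊢
      rw [this, ih]
      simp

-- one requirement's matcher list hits the joined string iff it hits some individual doc
lemma any_tok_join (m : List String) (docs : List String)
    (hm : ∀ tok ∈ m, sepSafe tok.toList) :
    (m.any (fun tok => PySem.Str.isIn tok (PySem.Str.join " | " docs)))
      = (docs.any (fun d => m.any (fun tok => PySem.Str.isIn tok d))) := by
  rw [Bool.eq_iff_iff]
  simp only [List.any_eq_true, PySem.Str.isIn_iff_infix, PySem.Str.toList_join]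
  have hsep : (" | " : String).toList = [' ', '|', ' '] := by decide
  rw [hsep]
  constructor
  · rintro ⟨tok, htok, hin⟩
    rw [infix_join_sep _ _ (hm tok htok)] at hin
    obtain ⟨p, hp, hinf⟩ := hin
    obtain ⟨d, hd, rfl⟩ := List.mem_map.mp hp
    exact ⟨d, hd, tok, htok, hinf⟩
  · rintro ⟨d, hd, tok, htok, hinf⟩
    refine ⟨tok, htok, ?_⟩
    rw [infix_join_sep _ _ (hm tok htok)]
    exact ⟨d.toList, List.mem_map.mpr ⟨d, hd, rfl⟩, hinf⟩

-- one step of B's inner loop, as set membership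
lemma mem_step (d : String) (s' : PySem.Set String) (lm : String × List String) (x : String) :
    (x ∈ (if !(PySem.Set.contains s' lm.1) && lm.2.any (fun tok => PySem.Str.isIn tok d)
          then PySem.Set.add s' lm.1 else s'))
      ↔ x ∈ s' ∨ (x = lm.1 ∧ lm.2.any (fun tok => PySem.Str.isIn tok d) = true) := by
  by_cases h : (!(PySem.Set.contains s' lm.1) && lm.2.any (fun tok => PySem.Str.isIn tok d)) = true
  · rw [if_pos h, PySem.Set.mem_add]
    rw [Bool.and_eq_true] at h
    constructor
    · rintro (hx | rfl)
      · exact Or.inl hx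
      · exact Or.inr ⟨rfl, h.2⟩
    · rintro (hx | ⟨rfl, _⟩)
      · exact Or.inl hx
      · exact Or.inr rfl
  · rw [if_neg h]
    rw [Bool.and_eq_true, Bool.not_eq_true'] at h
    constructor
    · exact Or.inl
    · rintro (hx | ⟨rfl, hany⟩)
      · exact hx
      · rcases Bool.eq_false_or_eq_true (PySem.Set.contains s' lm.1) with hc | hc
        · exact (PySem.Set.contains_iff _ _).mp hc
        · exact absurd ⟨hc, hany⟩ h

-- membership after B's inner fold over the matcher table
lemma mem_inner_fold (d : String) (ms : List (String × List String)) (s : PySem.Set String) (x : String) :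
    x ∈ ms.foldl (fun s' lm =>
        if !(PySem.Set.contains s' lm.1) && lm.2.any (fun tok => PySem.Str.isIn tok d)
        then PySem.Set.add s' lm.1 else s') s
      ↔ x ∈ s ∨ ∃ lm ∈ ms, x = lm.1 ∧ lm.2.any (fun tok => PySem.Str.isIn tok d) = true := by
  induction ms generalizing s with
  | nil => simp
  | cons lm rest ih =>
    rw [List.foldl_cons, ih, mem_step]
    constructor
    · rintro ((hx | ⟨rfl, hm⟩) | ⟨lm', h1, h2⟩)
      · exact Or.inl hx
      · exact Or.inr ⟨lm, List.mem_cons_self, rfl, hm⟩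
      · exact Or.inr ⟨lm', List.mem_cons_of_mem _ h1, h2⟩
    · rintro (hx | ⟨lm', h1, rfl, hm⟩)
      · exact Or.inl (Or.inl hx)
      · rcases List.mem_cons.mp h1 with rfl | h1'
        · exact Or.inl (Or.inr ⟨rfl, hm⟩)
        · exact Or.inr ⟨lm', h1', rfl, hm⟩

-- membership in B's satisfied set
lemma mem_satisfied (docs : List String) (s : PySem.Set String) (x : String) :
    x ∈ docs.foldl (fun s doc =>
        requiredWithMatchers.foldl (fun s' lm =>
          if !(PySem.Set.contains s' lm.1) && lm.2.any (fun tok => PySem.Str.isIn tok (PySem.Str.lower doc))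
          then PySem.Set.add s' lm.1 else s') s) s
      ↔ x ∈ s ∨ ∃ d ∈ docs, ∃ lm ∈ requiredWithMatchers, x = lm.1 ∧
          lm.2.any (fun tok => PySem.Str.isIn tok (PySem.Str.lower d)) = true := by
  induction docs generalizing s with
  | nil => simp
  | cons doc rest ih =>
    rw [List.foldl_cons, ih, mem_inner_fold]
    constructor
    · rintro ((h | ⟨lm, hlm, rfl, hm⟩) | ⟨d, hd, h⟩)
      · exact Or.inl h
      · exact Or.inr ⟨doc, by simp, lm, hlm, rfl, hm⟩
      · exact Or.inr ⟨d, by simp [hd], h⟩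
    · rintro (h | ⟨d, hd, h⟩)
      · exact Or.inl (Or.inl h)
      · rcases List.mem_cons.mp hd with rfl | hd'
        · exact Or.inl (Or.inr h)
        · exact Or.inr ⟨d, hd', h⟩

-- every token in the table is separator-safe
lemma matchers_sepSafe : ∀ lm ∈ requiredWithMatchers, ∀ tok ∈ lm.2, sepSafe tok.toList := by
  decide

-- the table's labels identify their row uniquely
lemma labels_uniq : ∀ lm ∈ requiredWithMatchers, ∀ lm' ∈ requiredWithMatchers, lm'.1 = lm.1 → lm' = lm := by
  decide

-- per-label characterisation of B's filter predicate
lemma contains_satisfied (docs : List String) (lm : (String × List String)) (hlm : lm ∈ requiredWithMatchers) :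
    (PySem.Set.contains
        (docs.foldl (fun s doc =>
          requiredWithMatchers.foldl (fun s' lm' =>
            if !(PySem.Set.contains s' lm'.1) && lm'.2.any (fun tok => PySem.Str.isIn tok (PySem.Str.lower doc))
            then PySem.Set.add s' lm'.1 else s') s) PySem.Set.empty) lm.1)
      = (lm.2.any (fun tok => PySem.Str.isIn tok (PySem.Str.join " | " (docs.map PySem.Str.lower)))) := by
  rw [Bool.eq_iff_iff, PySem.Set.contains_iff, mem_satisfied]
  rw [any_tok_join lm.2 (docs.map PySem.Str.lower) (matchers_sepSafe lm hlm)]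
  constructor
  · rintro (h | ⟨d, hd, lm', hlm', heq, hm⟩)
    · exact absurd h (by simp [PySem.Set.empty])
    · cases labels_uniq lm hlm lm' hlm' heq.symm
      exact List.any_eq_true.mpr ⟨PySem.Str.lower d, List.mem_map.mpr ⟨d, hd, rfl⟩, hm⟩
  · intro h
    obtain ⟨d', hd', hm⟩ := List.any_eq_true.mp h
    obtain ⟨d, hd, rfl⟩ := List.mem_map.mp hd'
    exact Or.inr ⟨d, hd, lm, hlm, rfl, hm⟩

-- the two programs agree for any list of submitted docs
lemma main_eq (docs : List String) :
    (requiredWithMatchers.filter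
        (fun lm => !(lm.2.any (fun tok =>
          PySem.Str.isIn tok (PySem.Str.join " | " (docs.map PySem.Str.lower)))))).map (·.1)
      = (requiredWithMatchers.map (·.1)).filter (fun l =>
          !(PySem.Set.contains
            (docs.foldl (fun s doc =>
              requiredWithMatchers.foldl (fun s' lm =>
                if !(PySem.Set.contains s' lm.1) && lm.2.any (fun tok => PySem.Str.isIn tok (PySem.Str.lower doc))
                then PySem.Set.add s' lm.1 else s') s) PySem.Set.empty) l)) := by
  rw [List.filter_map]
  congr 1
  apply List.filter_congr
  intro lm hlm
  rw [Function.comp_apply, contains_satisfied docs lm hlm]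

-- ===== VERDICT (by name: the statement is the Claim_ definition above) =====
theorem missing_documents_spec : Claim_equal_missing_documents := by
  intro profile _
  unfold Spec_missing_documents missing_documents missing_documents_alt normalize_docs requiredDocsList
  exact main_eq ((PySem.Dict.mk profile).getD "submitted_docs" [])
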